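-- pv_equiv track=rewrite | github.com/mtsraposo/dsa | sub_array_sum.py | gen_cumulative_numbers
-- ===== SOURCE A (Python) =====
-- def gen_cumulative_numbers(numbers):
--     cumulative_numbers = []
--     cum_sum = 0
--     zeros_count = 0
--     for number in numbers:
--         cum_sum += number
--         zeros_count += 1 if number == 0 else 0
--         cumulative_numbers += [[cum_sum, zeros_count]]
--     return cumulative_numbers
-- ===== SOURCE B (Python) =====
-- def _prefix_sums(values):
--     out = []
--     acc = 0
--     for v in values:
--         acc += v
--         out.append(acc)
--     return out
--
--
-- def gen_cumulative_numbers(numbers):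
--     sums = _prefix_sums(numbers)
--     zeros = _prefix_sums([1 if n == 0 else 0 for n in numbers])
--     return [[s, z] for s, z in zip(sums, zeros)]
-- ===== Notes on version B (the rewrite author's own statement) =====
-- stated objective: idiomatic
-- what changed: Replaces the single loop threading three pieces of state with two independent prefix-sum passes (sums and zero-indicator counts) combined by zip into the output pairs.
import Mathlib
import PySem

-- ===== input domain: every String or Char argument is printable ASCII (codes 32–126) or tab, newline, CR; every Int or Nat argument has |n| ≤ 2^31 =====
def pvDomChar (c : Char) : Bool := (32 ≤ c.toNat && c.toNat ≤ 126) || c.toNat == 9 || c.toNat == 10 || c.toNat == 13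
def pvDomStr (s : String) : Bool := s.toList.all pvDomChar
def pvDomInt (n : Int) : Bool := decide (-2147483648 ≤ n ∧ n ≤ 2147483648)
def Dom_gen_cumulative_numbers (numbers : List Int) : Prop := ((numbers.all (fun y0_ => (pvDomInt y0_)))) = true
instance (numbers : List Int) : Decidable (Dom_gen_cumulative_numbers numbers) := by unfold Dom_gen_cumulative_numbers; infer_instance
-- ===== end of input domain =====

-- B replaces A's single loop over three state variables by two independent prefix-sum passes combined with zip (more idiomatic decomposition).

-- ===== PORT A =====
def gen_cumulative_numbers (numbers : List Int) : List (List Int) :=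
  (numbers.foldl
    (fun (st : List (List Int) × Int × Int) number =>
      let cum_sum := st.2.1 + number
      let zeros_count := st.2.2 + (if number == 0 then 1 else 0)
      (st.1 ++ [[cum_sum, zeros_count]], cum_sum, zeros_count))
    ([], 0, 0)).1

-- ===== PORT B =====
-- _prefix_sums from Source B
def prefixSums (values : List Int) : List Int :=
  (values.foldl
    (fun (st : List Int × Int) v =>
      let acc := st.2 + v
      (st.1 ++ [acc], acc))
    ([], 0)).1

def gen_cumulative_numbers_alt (numbers : List Int) : List (List Int) :=
  let sums := prefixSums numbers
  let zeros := prefixSums (numbers.map (fun n => if n == 0 then 1 else 0))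
  (sums.zip zeros).map (fun p => [p.1, p.2])

-- ===== PRECONDITION & SPEC =====
def Spec_gen_cumulative_numbers (numbers : List Int) (out : List (List Int)) : Prop := out = gen_cumulative_numbers_alt numbers
instance (numbers : List Int) (out : List (List Int)) : Decidable (Spec_gen_cumulative_numbers numbers out) := by unfold Spec_gen_cumulative_numbers; infer_instance

-- ===== CLAIM (what is proved, stated in full; the proofs are below) =====
def Claim_equal_gen_cumulative_numbers : Prop := ∀ (numbers : List Int), Dom_gen_cumulative_numbers numbers → Spec_gen_cumulative_numbers numbers (gen_cumulative_numbers numbers)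

-- ===== LEMMAS AND PROOFS =====

-- reference recursion for a prefix-sum pass starting from s
def psRef (s : Int) : List Int → List Int
  | [] => []
  | v :: vs => (s + v) :: psRef (s + v) vs

lemma prefixSums_fold (vs : List Int) : ∀ (acc : List Int) (s : Int),
    (vs.foldl
      (fun (st : List Int × Int) v =>
        let a := st.2 + v
        (st.1 ++ [a], a))
      (acc, s)) = (acc ++ psRef s vs, s + vs.sum) := by
  induction vs with
  | nil => intro acc s; simp [psRef]
  | cons v vs ih =>
    intro acc s
    simp only [List.foldl_cons, psRef, ih, List.sum_cons]
    refine Prod.ext ?_ (by ring)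
    simp

lemma foldA (vs : List Int) : ∀ (acc : List (List Int)) (s z : Int),
    (vs.foldl
      (fun (st : List (List Int) × Int × Int) number =>
        let cs := st.2.1 + number
        let zc := st.2.2 + (if number == 0 then 1 else 0)
        (st.1 ++ [[cs, zc]], cs, zc))
      (acc, s, z)).1
    = acc ++ ((psRef s vs).zip (psRef z (vs.map (fun n => if n == 0 then 1 else 0)))).map
        (fun p => [p.1, p.2]) := by
  induction vs with
  | nil => intro acc s z; simp [psRef]
  | cons v vs ih =>
    intro acc s z
    simp only [List.foldl_cons, List.map_cons, psRef, ih, List.zip_cons_cons, List.map_cons]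
    simp

-- ===== VERDICT (by name: the statement is the Claim_ definition above) =====
theorem gen_cumulative_numbers_spec : Claim_equal_gen_cumulative_numbers := by
  intro numbers _
  show _ = _
  unfold gen_cumulative_numbers gen_cumulative_numbers_alt prefixSums
  rw [foldA, prefixSums_fold, prefixSums_fold]
  simp
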